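-- pv_equiv track=rewrite | github.com/EricHayter/logic-cli | logic/karnaugh.py | included_minterms
-- ===== SOURCE A (Python) =====
-- def included_minterms(minterms: list[tuple[bool | None]], implicant: tuple[bool | None]) -> list[tuple[bool | None]]:
--     """ Returns a filtered list of minterms such that each value inside each of the minterms is equal to implicant.
--     However, if the value of a variable in the implicant is None the minterm will match no matter what.
--
--     :param minterms: a list of tuples containing boolean values to represent logical minterms
--     :param implicant: a single implicant containing boolean and/or none values to represent implicants
--     :return: a filtered list of minterms that are contained within the implicant
--     """
--     included = []
--     for minterm in minterms:
--         for m, i in zip(minterm, implicant):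
--             if i is True and m is False:
--                 break
--             elif i is False and m is True:
--                 break
--         else:
--             included.append(minterm)
--     return included
-- ===== SOURCE B (Python) =====
-- def included_minterms(minterms, implicant):
--     # Staged filtering: iterate over the implicant positions and, for each
--     # fixed position, make one pruning pass over the surviving candidates.
--     candidates = list(minterms)
--     for j, v in enumerate(implicant):
--         if v is True:
--             candidates = [m for m in candidates
--                           if not (j < len(m) and m[j] is False)]
--         elif v is False:
--             candidates = [m for m in candidates
--                           if not (j < len(m) and m[j] is True)]
--     return candidates
-- ===== Notes on version B (the rewrite author's own statement) =====
-- stated objective: alternative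
-- what changed: B inverts the loop nesting: it iterates over the implicant's positions and for each fixed position makes one pruning pass over the surviving candidate list (staged filtering, clamped to each minterm's length to reproduce zip truncation), instead of A's per-minterm inner zip scan with a for/else break.
import Mathlib
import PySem

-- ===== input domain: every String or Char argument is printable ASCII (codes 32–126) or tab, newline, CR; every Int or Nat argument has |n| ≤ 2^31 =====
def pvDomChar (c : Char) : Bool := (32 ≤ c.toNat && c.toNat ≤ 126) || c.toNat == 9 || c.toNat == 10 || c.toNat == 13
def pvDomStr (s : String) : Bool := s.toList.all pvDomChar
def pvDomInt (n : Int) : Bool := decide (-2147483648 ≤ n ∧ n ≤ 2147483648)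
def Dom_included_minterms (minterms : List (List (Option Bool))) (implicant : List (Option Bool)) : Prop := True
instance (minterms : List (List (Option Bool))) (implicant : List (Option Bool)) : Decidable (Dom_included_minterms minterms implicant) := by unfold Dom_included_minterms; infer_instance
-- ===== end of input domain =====

-- B inverts the loop nesting: it loops over the implicant's positions, one pruning pass per
-- fixed position over the surviving candidates, instead of A's per-minterm zip scan; same cost class.

-- ===== PORT A =====
-- the inner for/else over zip(minterm, implicant): true ⇔ the loop finishes without break
def pvAScan : List (Option Bool × Option Bool) → Bool
  | [] => true
  | (m, i) :: rest =>
      if i = some true ∧ m = some false then false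
      else if i = some false ∧ m = some true then false
      else pvAScan rest

def included_minterms (minterms : List (List (Option Bool))) (implicant : List (Option Bool)) : List (List (Option Bool)) :=
  minterms.foldl (fun included minterm =>
    if pvAScan (minterm.zip implicant) then included ++ [minterm] else included) []

-- ===== PORT B =====
-- for j, v in enumerate(implicant): prune the candidate list at each fixed position
-- ('j < len(m) and m[j] is …' is ported as the optional access m[j]?)
def pvBLoop (j : Nat) (implicant : List (Option Bool))
    (cands : List (List (Option Bool))) : List (List (Option Bool)) :=
  match implicant with
  | [] => cands
  | some true :: rest =>
      pvBLoop (j + 1) rest (cands.filter (fun m => !(m[j]? = some (some false) : Bool)))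
  | some false :: rest =>
      pvBLoop (j + 1) rest (cands.filter (fun m => !(m[j]? = some (some true) : Bool)))
  | none :: rest => pvBLoop (j + 1) rest cands

def included_minterms_alt (minterms : List (List (Option Bool))) (implicant : List (Option Bool)) : List (List (Option Bool)) :=
  pvBLoop 0 implicant minterms

-- ===== PRECONDITION & SPEC =====
def Spec_included_minterms (minterms : List (List (Option Bool))) (implicant : List (Option Bool)) (out : List (List (Option Bool))) : Prop := out = included_minterms_alt minterms implicant
instance (minterms : List (List (Option Bool))) (implicant : List (Option Bool)) (out : List (List (Option Bool))) : Decidable (Spec_included_minterms minterms implicant out) := by unfold Spec_included_minterms; infer_instance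

-- ===== CLAIM (what is proved, stated in full; the proofs are below) =====
def Claim_equal_included_minterms : Prop := ∀ (minterms : List (List (Option Bool))) (implicant : List (Option Bool)), Dom_included_minterms minterms implicant → Spec_included_minterms minterms implicant (included_minterms minterms implicant)

-- ===== LEMMAS AND PROOFS =====

-- the conjunction of the constraint tests from position j on
def pvChk (j : Nat) (implicant : List (Option Bool)) (m : List (Option Bool)) : Bool :=
  match implicant with
  | [] => true
  | some true :: rest => !(m[j]? = some (some false) : Bool) && pvChk (j + 1) rest m
  | some false :: rest => !(m[j]? = some (some true) : Bool) && pvChk (j + 1) rest m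
  | none :: rest => pvChk (j + 1) rest m

theorem pvBLoop_filter (implicant : List (Option Bool)) :
    ∀ (j : Nat) (cands : List (List (Option Bool))),
      pvBLoop j implicant cands = cands.filter (pvChk j implicant) := by
  induction implicant with
  | nil => intro j cands; simp [pvBLoop, pvChk]
  | cons i rest ih =>
    intro j cands
    rcases i with _ | (_ | _) <;>
      simp [pvBLoop, pvChk, ih, List.filter_filter] <;>
      exact List.filter_congr (fun m _ => by rcases h : m[j]? with _ | m' <;> simp [Bool.and_comm])

theorem pvChk_out (implicant : List (Option Bool)) :
    ∀ (j : Nat) (m : List (Option Bool)), m.length ≤ j → pvChk j implicant m = true := by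
  induction implicant with
  | nil => intro j m h; rfl
  | cons i rest ih =>
    intro j m h
    have hget : m[j]? = none := List.getElem?_eq_none_iff.mpr h
    rcases i with _ | (_ | _) <;> simp [pvChk, hget, ih (j + 1) m (Nat.le_succ_of_le h)]

theorem pvChk_zip (implicant : List (Option Bool)) :
    ∀ (pre mt : List (Option Bool)),
      pvChk pre.length implicant (pre ++ mt) = pvAScan (mt.zip implicant) := by
  induction implicant with
  | nil => intro pre mt; cases mt <;> rfl
  | cons i rest ih =>
    intro pre mt
    cases mt with
    | nil =>
      simp only [List.append_nil, List.zip_nil_left, pvAScan]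
      exact pvChk_out (i :: rest) pre.length pre (Nat.le_refl _)
    | cons m mt' =>
      have hget : (pre ++ m :: mt')[pre.length]? = some m := by
        rw [List.getElem?_append_right (Nat.le_refl _)]; simp
      have hstep : pre ++ m :: mt' = (pre ++ [m]) ++ mt' := by simp
      have hlen : pre.length + 1 = (pre ++ [m]).length := by simp
      have ihstep : pvChk (pre.length + 1) rest (pre ++ m :: mt') = pvAScan (mt'.zip rest) := by
        rw [hstep, hlen]; exact ih (pre ++ [m]) mt'
      rcases i with _ | (_ | _) <;>
        · simp only [pvChk, List.zip_cons_cons, pvAScan, hget, ihstep]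
          rcases m with _ | (_ | _) <;> simp

theorem pvFoldl_filter (implicant : List (Option Bool)) :
    ∀ (minterms acc : List (List (Option Bool))),
      minterms.foldl (fun included minterm =>
        if pvAScan (minterm.zip implicant) then included ++ [minterm] else included) acc
      = acc ++ minterms.filter (fun minterm => pvAScan (minterm.zip implicant)) := by
  intro minterms
  induction minterms with
  | nil => intro acc; simp
  | cons mt rest ih =>
    intro acc
    simp only [List.foldl_cons, List.filter_cons]
    by_cases h : pvAScan (mt.zip implicant) = true
    · simp [h, ih]
    · simp [eq_false_of_ne_true h, ih]

-- ===== VERDICT (by name: the statement is the Claim_ definition above) =====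
theorem included_minterms_spec : Claim_equal_included_minterms := by
  intro minterms implicant _
  unfold Spec_included_minterms included_minterms included_minterms_alt
  rw [pvFoldl_filter implicant minterms [], List.nil_append, pvBLoop_filter implicant 0 minterms]
  exact List.filter_congr (fun mt _ => by simpa using (pvChk_zip implicant [] mt).symm)
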